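-- pv_equiv track=rewrite | github.com/Code-ed-vvs/Project-Nexus | server.py | password_meets_requirements
-- ===== SOURCE A (Python) =====
-- def password_meets_requirements(password):
--     """Check if password meets minimum security requirements."""
--     if len(password) < 8:
--         return False, "Password must be at least 8 characters long"
--     if not any(c.isupper() for c in password):
--         return False, "Password must contain at least one uppercase letter"
--     if not any(c.islower() for c in password):
--         return False, "Password must contain at least one lowercase letter"
--     if not any(c.isdigit() for c in password):
--         return False, "Password must contain at least one number"
--     if not any(c in "!@#$%^&*()_+-=[]{}|;:,.<>?" for c in password):
--         return False, "Password must contain at least one special character"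
--     return True, ""
-- ===== SOURCE B (Python) =====
-- def password_meets_requirements(password):
--     """Check if password meets minimum security requirements (single pass)."""
--     has_upper = has_lower = has_digit = has_special = False
--     for c in password:
--         if c.isupper():
--             has_upper = True
--         if c.islower():
--             has_lower = True
--         if c.isdigit():
--             has_digit = True
--         if c in "!@#$%^&*()_+-=[]{}|;:,.<>?":
--             has_special = True
--     if len(password) < 8:
--         return False, "Password must be at least 8 characters long"
--     if not has_upper:
--         return False, "Password must contain at least one uppercase letter"
--     if not has_lower:
--         return False, "Password must contain at least one lowercase letter"
--     if not has_digit: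
--         return False, "Password must contain at least one number"
--     if not has_special:
--         return False, "Password must contain at least one special character"
--     return True, ""
-- ===== Notes on version B (the rewrite author's own statement) =====
-- stated objective: alternative
-- what changed: B replaces A's four separate any(...) generator scans with one loop over the password that accumulates four boolean flags, then returns the failure messages in the same priority order.
import Mathlib
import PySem

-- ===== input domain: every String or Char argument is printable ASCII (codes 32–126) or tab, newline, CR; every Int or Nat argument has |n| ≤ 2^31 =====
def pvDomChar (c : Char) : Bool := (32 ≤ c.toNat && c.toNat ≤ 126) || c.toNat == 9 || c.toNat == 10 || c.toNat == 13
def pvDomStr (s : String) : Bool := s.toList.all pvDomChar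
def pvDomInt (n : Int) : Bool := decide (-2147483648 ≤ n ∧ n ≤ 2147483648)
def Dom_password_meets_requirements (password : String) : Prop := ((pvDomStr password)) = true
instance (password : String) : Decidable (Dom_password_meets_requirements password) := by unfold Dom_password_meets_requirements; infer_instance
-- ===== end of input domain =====

-- B replaces A's four separate any(...) scans with one single-pass loop accumulating four flags (alternative decomposition, same cost).


-- ===== PORT A =====
-- the special-character string literal from A
def pwSpecials : List Char := "!@#$%^&*()_+-=[]{}|;:,.<>?".toList

def password_meets_requirements (password : String) : Bool × String :=
  let cs := password.toList
  if cs.length < 8 then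
    (false, "Password must be at least 8 characters long")
  else if !(cs.any PySem.Chars.isupper) then
    (false, "Password must contain at least one uppercase letter")
  else if !(cs.any PySem.Chars.islower) then
    (false, "Password must contain at least one lowercase letter")
  else if !(cs.any PySem.Chars.isdigit) then
    (false, "Password must contain at least one number")
  else if !(cs.any (fun c => pwSpecials.contains c)) then
    (false, "Password must contain at least one special character")
  else
    (true, "")

-- ===== PORT B =====
-- single pass accumulating the four flags, then the priority-ordered checks
def pwScan (cs : List Char) (f : Bool × Bool × Bool × Bool) : Bool × Bool × Bool × Bool :=
  cs.foldl (fun f c =>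
    ((if PySem.Chars.isupper c then true else f.1),
     (if PySem.Chars.islower c then true else f.2.1),
     (if PySem.Chars.isdigit c then true else f.2.2.1),
     (if pwSpecials.contains c then true else f.2.2.2))) f

def password_meets_requirements_alt (password : String) : Bool × String :=
  let f := pwScan password.toList (false, false, false, false)
  if password.toList.length < 8 then
    (false, "Password must be at least 8 characters long")
  else if !f.1 then
    (false, "Password must contain at least one uppercase letter")
  else if !f.2.1 then
    (false, "Password must contain at least one lowercase letter")
  else if !f.2.2.1 then
    (false, "Password must contain at least one number")
  else if !f.2.2.2 then
    (false, "Password must contain at least one special character")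
  else
    (true, "")

-- ===== PRECONDITION & SPEC =====
def Spec_password_meets_requirements (password : String) (out : Bool × String) : Prop := out = password_meets_requirements_alt password
instance (password : String) (out : Bool × String) : Decidable (Spec_password_meets_requirements password out) := by unfold Spec_password_meets_requirements; infer_instance

-- ===== CLAIM (what is proved, stated in full; the proofs are below) =====
def Claim_equal_password_meets_requirements : Prop := ∀ (password : String), Dom_password_meets_requirements password → Spec_password_meets_requirements password (password_meets_requirements password)

-- ===== LEMMAS AND PROOFS =====
theorem pwScan_eq (cs : List Char) (a b c d : Bool) :
    pwScan cs (a, b, c, d) =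
      (a || cs.any PySem.Chars.isupper,
       b || cs.any PySem.Chars.islower,
       c || cs.any PySem.Chars.isdigit,
       d || cs.any (fun x => pwSpecials.contains x)) := by
  induction cs generalizing a b c d with
  | nil => simp [pwScan]
  | cons x xs ih =>
    simp only [pwScan, List.foldl_cons] at *
    rw [ih]
    simp only [List.any_cons]
    cases hu : PySem.Chars.isupper x <;> cases hl : PySem.Chars.islower x <;>
      cases hd : PySem.Chars.isdigit x <;> cases hs : pwSpecials.contains x <;> simp

-- ===== VERDICT (by name: the statement is the Claim_ definition above) =====
theorem password_meets_requirements_spec : Claim_equal_password_meets_requirements := by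
  intro password _
  unfold Spec_password_meets_requirements password_meets_requirements password_meets_requirements_alt
  rw [pwScan_eq]
  simp
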